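-- pv_equiv track=rewrite | github.com/stevenhorsman/advent-of-code-2019 | day-04/secure_container.py | meets_critera
-- ===== SOURCE A (Python) =====
-- def meets_critera(input):
--     digits = [int(char) for char in str(input)]
--     if len(digits) != 6:
--         return False
--
--     double_found = False
--
--     for i in range(len(digits)-1):
--         if digits[i] == digits[i+1] :
--             double_found = True
--         if digits[i] > digits[i+1] :
--             return False # It decreases
--
--     return double_found
-- ===== SOURCE B (Python) =====
-- def meets_critera(input):
--     digits = [int(char) for char in str(input)]
--     if len(digits) != 6:
--         return False
--     non_decreasing = digits == sorted(digits)
--     has_double = len(set(digits)) < len(digits)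
--     return non_decreasing and has_double
-- ===== Notes on version B (the rewrite author's own statement) =====
-- stated objective: idiomatic
-- what changed: Replaces the fused index loop with early returns by two declarative checks: monotonicity via digits == sorted(digits) and duplicate detection via len(set(digits)) < len(digits).
import Mathlib
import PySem

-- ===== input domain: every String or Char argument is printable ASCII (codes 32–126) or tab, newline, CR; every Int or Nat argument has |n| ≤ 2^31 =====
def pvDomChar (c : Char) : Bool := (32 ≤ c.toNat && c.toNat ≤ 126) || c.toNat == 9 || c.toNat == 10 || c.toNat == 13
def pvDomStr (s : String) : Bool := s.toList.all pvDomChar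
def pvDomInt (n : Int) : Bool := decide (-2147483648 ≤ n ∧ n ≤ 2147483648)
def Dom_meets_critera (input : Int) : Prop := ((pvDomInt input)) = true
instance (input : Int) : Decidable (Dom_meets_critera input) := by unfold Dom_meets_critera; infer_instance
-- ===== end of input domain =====

-- B replaces A's fused early-return index loop by two declarative checks
-- (digits == sorted(digits), and len(set(digits)) < len(digits)); objective: idiomatic.

-- ===== PORT A =====
-- digits = [int(char) for char in str(input)]  (int(char) raises on '-', excluded by Pre_)
def pvDigits (input : Int) : List Int :=
  (PySem.Int.toStr input).toList.map (fun c => (PySem.Int.ofChars? [c]).getD 0)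

-- the for-loop over i in range(len(digits)-1), as structural recursion on the list
def pvLoopA : List Int → Bool → Bool
  | [], db => db
  | [_], db => db
  | a :: b :: rest, db =>
      let db' := if a == b then true else db
      if a > b then false else pvLoopA (b :: rest) db'

def meets_critera (input : Int) : Bool :=
  let digits := pvDigits input
  if digits.length ≠ 6 then false
  else pvLoopA digits false

-- ===== PORT B =====
def meets_critera_alt (input : Int) : Bool :=
  let digits := pvDigits input
  if digits.length ≠ 6 then false
  else
    let nonDecreasing := digits == PySem.List.sorted digits (fun x => x)
    let hasDouble := decide (PySem.Set.len (PySem.Set.ofList digits) < (digits.length : Int))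
    nonDecreasing && hasDouble

-- ===== PRECONDITION & SPEC =====
-- Pre_ excludes negative inputs, on which str(input) contains '-' and int('-') raises ValueError in both A and B.
def Pre_meets_critera (input : Int) : Prop := 0 ≤ input
instance (input : Int) : Decidable (Pre_meets_critera input) := by unfold Pre_meets_critera; infer_instance
def pvWitness_meets_critera : Int := (111122)

def Spec_meets_critera (input : Int) (out : Bool) : Prop := out = meets_critera_alt input
instance (input : Int) (out : Bool) : Decidable (Spec_meets_critera input out) := by unfold Spec_meets_critera; infer_instance

-- ===== CLAIM (what is proved, stated in full; the proofs are below) =====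
def Claim_equal_meets_critera : Prop := ∀ (input : Int), Dom_meets_critera input → Pre_meets_critera input → Spec_meets_critera input (meets_critera input)

-- ===== LEMMAS AND PROOFS =====

-- adjacent-equal test, the semantic content of A's double detection
def pvAdjEq : List Int → Bool
  | a :: b :: rest => (a == b) || pvAdjEq (b :: rest)
  | _ => false

theorem pvLoopA_eq (l : List Int) :
    ∀ db, pvLoopA l db =
      if l.Pairwise (fun a b : Int => a ≤ b) then db || pvAdjEq l else false := by
  induction l with
  | nil => intro db; simp [pvLoopA, pvAdjEq]
  | cons a t ih =>
    intro db
    cases t with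
    | nil => simp [pvLoopA, pvAdjEq]
    | cons b rest =>
      by_cases hab : a > b
      · have : ¬ (a :: b :: rest).Pairwise (fun a b : Int => a ≤ b) := by
          intro h
          have := (List.pairwise_cons.mp h).1 b (by simp)
          omega
        simp [pvLoopA, hab, this]
      · have hle : a ≤ b := by omega
        have hpw : (a :: b :: rest).Pairwise (fun a b : Int => a ≤ b) ↔
            (b :: rest).Pairwise (fun a b : Int => a ≤ b) := by
          constructor
          · intro h; exact (List.pairwise_cons.mp h).2
          · intro h
            refine List.pairwise_cons.mpr ⟨?_, h⟩
            intro x hx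
            rcases List.mem_cons.mp hx with rfl | hx'
            · exact hle
            · have hbx := (List.pairwise_cons.mp h).1 x hx'
              omega
        have := ih (if a == b then true else db)
        simp only [pvLoopA, hab, if_false, this, hpw]
        by_cases hp : (b :: rest).Pairwise (fun a b : Int => a ≤ b)
        · simp [hp, pvAdjEq]
          by_cases heq : a = b
          · simp [heq]
          · have hb : (a == b) = false := by simp [heq]
            simp [hb, heq]
        · simp [hp]

theorem pvSortedCheck (l : List Int) :
    (l == PySem.List.sorted l (fun x => x)) =
      decide (l.Pairwise (fun a b : Int => a ≤ b)) := by
  by_cases h : l.Pairwise (fun a b : Int => a ≤ b)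
  · simp [h, PySem.List.sorted_eq_self_of_pairwise l (fun x => x) h]
  · simp [h]
    intro heq
    exact absurd (heq ▸ PySem.List.sorted_pairwise l (fun x => x)) h

theorem pvOfList_perm_dedup (l : List Int) :
    (PySem.Set.ofList l).Perm l.dedup := by
  rw [List.perm_ext_iff_of_nodup (PySem.Set.nodup_ofList l) l.nodup_dedup]
  intro x
  rw [PySem.Set.mem_ofList, List.mem_dedup]

theorem pvNodupIff (l : List Int) (h : l.Pairwise (fun a b : Int => a ≤ b)) :
    pvAdjEq l = false ↔ l.Nodup := by
  induction l with
  | nil => simp [pvAdjEq]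
  | cons a t ih =>
    cases t with
    | nil => simp [pvAdjEq]
    | cons b rest =>
      have hpw := List.pairwise_cons.mp h
      have hle : a ≤ b := hpw.1 b (by simp)
      have ihd := ih hpw.2
      constructor
      · intro hfalse
        simp only [pvAdjEq, Bool.or_eq_false_iff] at hfalse
        obtain ⟨hne, htail⟩ := hfalse
        have hab : a ≠ b := by simpa using hne
        have hnod := ihd.mp htail
        refine List.nodup_cons.mpr ⟨?_, hnod⟩
        intro hmem
        rcases List.mem_cons.mp hmem with heq' | hmem'
        · exact hab heq'
        · have := (List.pairwise_cons.mp hpw.2).1 a hmem'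
          have hlt : a < b := lt_of_le_of_ne hle hab
          omega
      · intro hnod
        have := List.nodup_cons.mp hnod
        simp only [pvAdjEq, Bool.or_eq_false_iff]
        refine ⟨?_, ihd.mpr this.2⟩
        have hab : a ≠ b := by
          intro hab; exact this.1 (by simp [hab])
        simpa using hab

theorem pvDoubleCheck (l : List Int) (h : l.Pairwise (fun a b : Int => a ≤ b)) :
    pvAdjEq l = decide (PySem.Set.len (PySem.Set.ofList l) < (l.length : Int)) := by
  have hlen : (PySem.Set.ofList l).length = l.dedup.length := (pvOfList_perm_dedup l).length_eq
  have hsub : l.dedup.length ≤ l.length := l.dedup_sublist.length_le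
  have hdecl : PySem.Set.len (PySem.Set.ofList l) = ((PySem.Set.ofList l).length : Int) := rfl
  cases hadj : pvAdjEq l with
  | false =>
    have hnod := (pvNodupIff l h).mp hadj
    have : l.dedup = l := List.dedup_eq_self.mpr hnod
    simp [hlen, this]
  | true =>
    have hnnod : ¬ l.Nodup := by
      intro hnod
      rw [(pvNodupIff l h).mpr hnod] at hadj
      exact Bool.false_ne_true hadj
    have hne : l.dedup ≠ l := fun he => hnnod (he ▸ l.nodup_dedup)
    have hlt : l.dedup.length < l.length := by
      rcases lt_or_eq_of_le hsub with hlt | heq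
      · exact hlt
      · exact absurd (l.dedup_sublist.eq_of_length heq) hne
    simp [hlen]
    omega

theorem pvMain (l : List Int) :
    pvLoopA l false =
      ((l == PySem.List.sorted l (fun x => x)) &&
        decide (PySem.Set.len (PySem.Set.ofList l) < (l.length : Int))) := by
  rw [pvLoopA_eq l false, pvSortedCheck]
  by_cases h : l.Pairwise (fun a b : Int => a ≤ b)
  · simp [h, pvDoubleCheck l h]
  · simp [h]

-- ===== VERDICT (by name: the statement is the Claim_ definition above) =====
theorem meets_critera_spec : Claim_equal_meets_critera := by
  intro input _ _
  unfold Spec_meets_critera meets_critera meets_critera_alt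
  by_cases hlen : (pvDigits input).length ≠ 6
  · simp [hlen]
  · simp only [hlen, if_false]
    exact pvMain (pvDigits input)
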